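-- pv_equiv track=rewrite | github.com/Tjoslef/Algoritmy | Python/ Continuous Subarray Sum.py | checkSubarraySum
-- ===== SOURCE A (Python) =====
-- def checkSubarraySum(nums, k):
--     if len(nums) < 2:
--         return False
--
--     Dstory = {0: -1}
--     csum = 0
--     Zcount = 0
--
--     for i in range(len(nums)):
--         if nums[i] == 0:
--             Zcount += 1
--         else:
--             Zcount = 0  # reset count if the current number is not zero
--
--         if Zcount >= 2:
--             return True
--
--         csum += nums[i]
--
--         if k != 0:
--             remaider = csum % k
--         else:
--             remaider = csum
--
--         if remaider in Dstory:
--             if i - Dstory[remaider] > 1: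
--                 return True
--         else:
--             Dstory[remaider] = i
--
--     return False
-- ===== SOURCE B (Python) =====
-- def checkSubarraySum(nums, k):
--     n = len(nums)
--     if n < 2:
--         return False
--     for i in range(n):
--         s = nums[i]
--         for j in range(i + 1, n):
--             s += nums[j]
--             if (s % k == 0) if k != 0 else (s == 0):
--                 return True
--     return False
-- ===== Notes on version B (the rewrite author's own statement) =====
-- stated objective: simpler
-- what changed: Replaces the prefix-sum-remainder hashmap single pass (with its zero-run counter) by a plain brute-force scan of all subarrays of length >= 2, testing each running sum directly.
import Mathlib
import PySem

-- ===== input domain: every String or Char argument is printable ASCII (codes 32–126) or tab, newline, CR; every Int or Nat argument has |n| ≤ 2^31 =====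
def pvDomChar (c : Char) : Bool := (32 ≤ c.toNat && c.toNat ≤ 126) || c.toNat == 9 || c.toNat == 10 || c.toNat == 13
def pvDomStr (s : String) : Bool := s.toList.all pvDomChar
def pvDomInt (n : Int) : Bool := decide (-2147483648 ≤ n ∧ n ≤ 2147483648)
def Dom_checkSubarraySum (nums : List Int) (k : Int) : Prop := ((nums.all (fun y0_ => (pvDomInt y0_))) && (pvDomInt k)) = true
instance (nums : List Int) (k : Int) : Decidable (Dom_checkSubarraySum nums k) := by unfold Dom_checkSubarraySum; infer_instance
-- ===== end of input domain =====

-- B replaces A's prefix-remainder hashmap single pass (with its zero-run counter) by a plain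
-- brute-force scan of all subarrays of length ≥ 2 (simpler, not faster); return values agree everywhere.

-- ===== PORT A =====
-- the for-loop of A: state (remaining list, index i, Dstory, csum, Zcount); early `return True` becomes `true`
def aLoop (nums : List Int) (k : Int) : List Int → Nat → PySem.Dict Int Int → Int → Int → Bool
  | [], _, _, _, _ => false
  | x :: rest, i, d, csum, z =>
    let z' : Int := if x == 0 then z + 1 else 0
    if z' ≥ 2 then true
    else
      let csum' := csum + x
      let r : Int := if k ≠ 0 then PySem.Int.mod csum' k else csum'
      match d.get? r with
      | some v => if (i : Int) - v > 1 then true else aLoop nums k rest (i + 1) d csum' z'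
      | none => aLoop nums k rest (i + 1) (d.insert r (i : Int)) csum' z'

def checkSubarraySum (nums : List Int) (k : Int) : Bool :=
  if nums.length < 2 then false
  else aLoop nums k nums 0 (PySem.Dict.empty.insert 0 (-1)) 0 0

-- ===== PORT B =====
-- inner loop of B: running sum extended by each further element, tested directly
def bInner (k : Int) : Int → List Int → Bool
  | _, [] => false
  | s, x :: rest =>
    let s' := s + x
    if (if k ≠ 0 then PySem.Int.mod s' k == 0 else s' == 0) then true else bInner k s' rest

-- outer loop of B over start positions
def bOuter (k : Int) : List Int → Bool
  | [] => false
  | x :: rest => if bInner k x rest then true else bOuter k rest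

def checkSubarraySum_alt (nums : List Int) (k : Int) : Bool :=
  if nums.length < 2 then false else bOuter k nums

-- ===== PRECONDITION & SPEC =====
def Spec_checkSubarraySum (nums : List Int) (k : Int) (out : Bool) : Prop := out = checkSubarraySum_alt nums k
instance (nums : List Int) (k : Int) (out : Bool) : Decidable (Spec_checkSubarraySum nums k out) := by unfold Spec_checkSubarraySum; infer_instance

-- ===== CLAIM (what is proved, stated in full; the proofs are below) =====
def Claim_equal_checkSubarraySum : Prop := ∀ (nums : List Int) (k : Int), Dom_checkSubarraySum nums k → Spec_checkSubarraySum nums k (checkSubarraySum nums k)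

-- ===== LEMMAS AND PROOFS =====

-- prefix sum of the first m elements
def pref (nums : List Int) (m : Nat) : Int := (nums.take m).sum

-- the "key" both programs implicitly compare: Python remainder of the prefix sum (the sum itself for k = 0)
def keyf (nums : List Int) (k : Int) (m : Nat) : Int :=
  if k ≠ 0 then PySem.Int.mod (pref nums m) k else pref nums m

-- there is a subarray of length ≥ 2 whose sum is ≡ 0 (mod k) (= 0 for k = 0)
def Good (nums : List Int) (k : Int) : Prop :=
  ∃ a b : Nat, a + 2 ≤ b ∧ b ≤ nums.length ∧ keyf nums k a = keyf nums k b

lemma keyf_eq (nums : List Int) (k : Int) (m : Nat) :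
    (if k ≠ 0 then PySem.Int.mod (pref nums m) k else pref nums m) = keyf nums k m := rfl

lemma keyf_congr (nums : List Int) (k : Int) (a b : Nat) (h : pref nums a = pref nums b) :
    keyf nums k a = keyf nums k b := by
  simp only [keyf]; rw [h]

lemma pref_add_drop (nums : List Int) (i m : Nat) :
    pref nums (i + m) = pref nums i + ((nums.drop i).take m).sum := by
  simp only [pref]
  rw [List.take_add, List.sum_append]

lemma pref_succ (nums : List Int) (i : Nat) (h : i < nums.length) :
    pref nums (i + 1) = pref nums i + nums[i] := by
  simp only [pref]
  exact List.sum_take_succ nums i h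

lemma mod_eq_mod_iff (k x y : Int) (hk : k ≠ 0) :
    PySem.Int.mod x k = PySem.Int.mod y k ↔ k ∣ (y - x) := by
  have hx := PySem.Int.floordiv_mul_add_mod x k
  have hy := PySem.Int.floordiv_mul_add_mod y k
  constructor
  · intro h
    refine ⟨PySem.Int.floordiv y k - PySem.Int.floordiv x k, ?_⟩
    rw [h] at hx
    linear_combination hx - hy
  · intro hd
    obtain ⟨c, hc⟩ := hd
    have hdv : PySem.Int.mod y k - PySem.Int.mod x k
        = k * (c - PySem.Int.floordiv y k + PySem.Int.floordiv x k) := by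
      linear_combination hy - hx + hc
    have h0 : PySem.Int.mod y k - PySem.Int.mod x k = 0 := by
      rcases lt_or_gt_of_ne hk with hneg | hpos
      · have b1 := PySem.Int.mod_neg_bounds x hneg
        have b2 := PySem.Int.mod_neg_bounds y hneg
        refine Int.eq_zero_of_abs_lt_dvd (m := -k)
          ⟨-(c - PySem.Int.floordiv y k + PySem.Int.floordiv x k), by linear_combination hdv⟩ ?_
        rw [abs_lt]; omega
      · have b1 := PySem.Int.mod_nonneg x hpos
        have b2 := PySem.Int.mod_nonneg y hpos
        have b3 := PySem.Int.mod_lt x hpos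
        have b4 := PySem.Int.mod_lt y hpos
        refine Int.eq_zero_of_abs_lt_dvd (m := k)
          ⟨c - PySem.Int.floordiv y k + PySem.Int.floordiv x k, hdv⟩ ?_
        rw [abs_lt]; omega
    omega

-- the subarray-sum test of B equals equality of the keys of its two prefix indices
lemma key_cond (nums : List Int) (k : Int) (a b : Nat) :
    ((if k ≠ 0 then PySem.Int.mod (pref nums b - pref nums a) k == 0
      else pref nums b - pref nums a == 0) = true) ↔ keyf nums k a = keyf nums k b := by
  by_cases hk : k = 0
  · subst hk
    simp [keyf, sub_eq_zero]
    exact eq_comm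
  · rw [if_pos hk]
    simp only [beq_iff_eq, keyf, if_pos hk]
    rw [PySem.Int.mod_eq_zero_iff_dvd, mod_eq_mod_iff k _ _ hk]

lemma bInner_iff (k s : Int) (l : List Int) :
    bInner k s l = true ↔ ∃ m : Nat, 1 ≤ m ∧ m ≤ l.length ∧
      (if k ≠ 0 then PySem.Int.mod (s + (l.take m).sum) k == 0
       else s + (l.take m).sum == 0) = true := by
  induction l generalizing s with
  | nil =>
    simp only [bInner]
    refine iff_of_false (by simp) ?_
    rintro ⟨m, h1, h2, -⟩
    simp at h2; omega
  | cons x t ih =>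
    simp only [bInner]
    by_cases hc : (if k ≠ 0 then PySem.Int.mod (s + x) k == 0 else (s + x) == 0) = true
    · rw [if_pos hc]
      refine iff_of_true rfl ⟨1, le_refl 1, by simp, by simpa using hc⟩
    · rw [if_neg hc, ih (s + x)]
      constructor
      · rintro ⟨m, h1, h2, h3⟩
        refine ⟨m + 1, by omega, by simp only [List.length_cons]; omega, ?_⟩
        have harg : s + ((x :: t).take (m + 1)).sum = s + x + (t.take m).sum := by
          simp only [List.take_succ_cons, List.sum_cons]; ring
        rw [harg]
        exact h3
      · rintro ⟨m, h1, h2, h3⟩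
        cases m with
        | zero => omega
        | succ m' =>
          rcases Nat.eq_zero_or_pos m' with h0 | hpos
          · subst h0
            exact absurd (by simpa using h3) hc
          · refine ⟨m', by omega, by simp only [List.length_cons] at h2; omega, ?_⟩
            have harg : s + ((x :: t).take (m' + 1)).sum = s + x + (t.take m').sum := by
              simp only [List.take_succ_cons, List.sum_cons]; ring
            rw [harg] at h3
            exact h3

lemma bOuter_iff (nums : List Int) (k : Int) :
    ∀ (l : List Int) (a : Nat), l = nums.drop a →
      (bOuter k l = true ↔
        ∃ a' b : Nat, a ≤ a' ∧ a' + 2 ≤ b ∧ b ≤ nums.length ∧ keyf nums k a' = keyf nums k b) := by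
  intro l
  induction l with
  | nil =>
    intro a hl
    have hlen := congrArg List.length hl
    simp only [List.length_nil, List.length_drop] at hlen
    refine iff_of_false (by simp [bOuter]) ?_
    rintro ⟨a', b, h1, h2, h3, -⟩
    omega
  | cons x t ih =>
    intro a hl
    have hlen := congrArg List.length hl
    simp only [List.length_cons, List.length_drop] at hlen
    have ha : a < nums.length := by omega
    rw [List.drop_eq_getElem_cons ha] at hl
    injection hl with hx ht
    have hsum : ∀ m : Nat, x + (t.take m).sum = pref nums (a + 1 + m) - pref nums a := by
      intro m
      have h1 := pref_add_drop nums (a + 1) m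
      rw [← ht] at h1
      have h2 : pref nums (a + 1) = pref nums a + x := by rw [pref_succ nums a ha, ← hx]
      rw [h1, h2]; ring
    simp only [bOuter]
    by_cases hbi : bInner k x t = true
    · rw [if_pos hbi]
      obtain ⟨m, hm1, hm2, hc⟩ := (bInner_iff k x t).mp hbi
      rw [hsum m] at hc
      refine iff_of_true rfl ⟨a, a + 1 + m, le_refl a, by omega, by omega,
        (key_cond nums k a (a + 1 + m)).mp hc⟩
    · rw [if_neg hbi, ih (a + 1) ht]
      constructor
      · rintro ⟨a', b, h1, h2, h3, h4⟩
        exact ⟨a', b, by omega, h2, h3, h4⟩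
      · rintro ⟨a', b, h1, h2, h3, h4⟩
        by_cases hae : a' = a
        · subst hae
          exfalso; apply hbi
          apply (bInner_iff k x t).mpr
          refine ⟨b - (a' + 1), by omega, by omega, ?_⟩
          have hb : a' + 1 + (b - (a' + 1)) = b := by omega
          rw [hsum (b - (a' + 1)), hb]
          exact (key_cond nums k a' b).mpr h4
        · exact ⟨a', b, by omega, h2, h3, h4⟩

lemma B_iff (nums : List Int) (k : Int) : checkSubarraySum_alt nums k = true ↔ Good nums k := by
  unfold checkSubarraySum_alt
  by_cases h2 : nums.length < 2
  · rw [if_pos h2]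
    refine iff_of_false (by simp) ?_
    rintro ⟨a, b, h1, hb, -⟩
    omega
  · rw [if_neg h2, bOuter_iff nums k nums 0 List.drop_zero.symm]
    constructor
    · rintro ⟨a', b, -, h2', h3, h4⟩
      exact ⟨a', b, h2', h3, h4⟩
    · rintro ⟨a, b, h1, h2', h3⟩
      exact ⟨a, b, Nat.zero_le a, h1, h2', h3⟩

-- m is the first prefix index whose key is r
def FirstOcc (nums : List Int) (k : Int) (r : Int) (m : Nat) : Prop :=
  keyf nums k m = r ∧ ∀ m' < m, keyf nums k m' ≠ r

-- the dict holds exactly the first occurrence (index minus one) of each key seen among prefixes 0..i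
def DInv (nums : List Int) (k : Int) (i : Nat) (d : PySem.Dict Int Int) : Prop :=
  ∀ r v, d.get? r = some v ↔ ∃ m : Nat, m ≤ i ∧ v = (m : Int) - 1 ∧ FirstOcc nums k r m

def NoGood (nums : List Int) (k : Int) (i : Nat) : Prop :=
  ∀ a b : Nat, a + 2 ≤ b → b ≤ i → keyf nums k a ≠ keyf nums k b

lemma exists_firstOcc (nums : List Int) (k r : Int) (m : Nat) (h : keyf nums k m = r) :
    ∃ m0, m0 ≤ m ∧ FirstOcc nums k r m0 := by
  have hex : ∃ j, keyf nums k j = r := ⟨m, h⟩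
  refine ⟨Nat.find hex, Nat.find_min' hex h, ?_⟩
  exact And.intro (Nat.find_spec hex) (fun m' hm' => Nat.find_min hex hm')

lemma hno_of_none (nums : List Int) (k : Int) (i : Nat) (d : PySem.Dict Int Int)
    (hD : DInv nums k i d) (hget : d.get? (keyf nums k (i + 1)) = none) :
    ∀ m ≤ i, keyf nums k m ≠ keyf nums k (i + 1) := by
  intro m hm hkey
  obtain ⟨m0, hm0, hfo⟩ := exists_firstOcc nums k (keyf nums k (i + 1)) m hkey
  have h := (hD (keyf nums k (i + 1)) ((m0 : Int) - 1)).mpr ⟨m0, by omega, rfl, hfo⟩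
  rw [hget] at h
  simp at h

lemma dinv_none (nums : List Int) (k : Int) (i : Nat) (d : PySem.Dict Int Int)
    (hD : DInv nums k i d) (hget : d.get? (keyf nums k (i + 1)) = none) :
    DInv nums k (i + 1) (d.insert (keyf nums k (i + 1)) (i : Int)) := by
  intro r' v'
  rw [PySem.Dict.get?_insert]
  by_cases hr : r' = keyf nums k (i + 1)
  · subst hr
    rw [if_pos rfl]
    constructor
    · intro hsv
      injection hsv with hv
      refine ⟨i + 1, le_refl _, by push_cast; omega, ?_⟩
      exact And.intro rfl (fun m' hm' h => hno_of_none nums k i d hD hget m' (by omega) h)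
    · rintro ⟨m', h1, h2, h3⟩
      have hm' : m' = i + 1 := by
        by_contra hne
        exact hno_of_none nums k i d hD hget m' (by omega) h3.1
      subst hm'
      simp only [Option.some.injEq]
      push_cast at h2 ⊢
      omega
  · rw [if_neg hr, hD r' v']
    constructor
    · rintro ⟨m', h1, h2, h3⟩
      exact ⟨m', by omega, h2, h3⟩
    · rintro ⟨m', h1, h2, h3⟩
      refine ⟨m', ?_, h2, h3⟩
      by_contra hgt
      have hm' : m' = i + 1 := by omega
      subst hm'
      exact hr h3.1.symm

lemma nogood_none (nums : List Int) (k : Int) (i : Nat) (d : PySem.Dict Int Int)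
    (hD : DInv nums k i d) (hN : NoGood nums k i)
    (hget : d.get? (keyf nums k (i + 1)) = none) :
    NoGood nums k (i + 1) := by
  intro a b h1 h2 hkey
  by_cases hb2 : b ≤ i
  · exact hN a b h1 hb2 hkey
  · have hbe : b = i + 1 := by omega
    subst hbe
    exact hno_of_none nums k i d hD hget a (by omega) hkey

lemma dinv_some (nums : List Int) (k : Int) (i : Nat) (d : PySem.Dict Int Int) (v : Int)
    (hD : DInv nums k i d) (hget : d.get? (keyf nums k (i + 1)) = some v)
    (hgap : ¬((i : Int) - v > 1)) :
    DInv nums k (i + 1) d := by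
  obtain ⟨m, hmi, hv, hf⟩ := (hD _ _).mp hget
  intro r' v'
  rw [hD r' v']
  constructor
  · rintro ⟨m', h1, h2, h3⟩
    exact ⟨m', by omega, h2, h3⟩
  · rintro ⟨m', h1, h2, h3⟩
    refine ⟨m', ?_, h2, h3⟩
    by_contra hgt
    have hm' : m' = i + 1 := by omega
    subst hm'
    exact h3.2 m (by omega) (hf.1.trans h3.1)

lemma nogood_some (nums : List Int) (k : Int) (i : Nat) (d : PySem.Dict Int Int) (v : Int)
    (hD : DInv nums k i d) (hN : NoGood nums k i)
    (hget : d.get? (keyf nums k (i + 1)) = some v)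
    (hgap : ¬((i : Int) - v > 1)) :
    NoGood nums k (i + 1) := by
  obtain ⟨m, hmi, hv, hf⟩ := (hD _ _).mp hget
  intro a b h1 h2 hkey
  by_cases hb2 : b ≤ i
  · exact hN a b h1 hb2 hkey
  · have hbe : b = i + 1 := by omega
    subst hbe
    have hma : m ≤ a := by
      by_contra hlt
      exact hf.2 a (by omega) hkey
    omega

lemma aLoop_cons_iff (nums : List Int) (k : Int) (x : Int) (rest : List Int) (i : Nat)
    (d : PySem.Dict Int Int) (z : Int)
    (hl : x :: rest = nums.drop i)
    (hz0 : 0 ≤ z)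
    (hz1 : 1 ≤ z → 1 ≤ i ∧ pref nums i = pref nums (i - 1))
    (hD : DInv nums k i d) (hN : NoGood nums k i)
    (IH : ∀ (i' : Nat) (d' : PySem.Dict Int Int) (z' : Int), rest = nums.drop i' → 0 ≤ z' →
      (1 ≤ z' → 1 ≤ i' ∧ pref nums i' = pref nums (i' - 1)) → DInv nums k i' d' → NoGood nums k i' →
      (aLoop nums k rest i' d' (pref nums i') z' = true ↔ Good nums k)) :
    aLoop nums k (x :: rest) i d (pref nums i) z = true ↔ Good nums k := by
  have hlen := congrArg List.length hl
  simp only [List.length_cons, List.length_drop] at hlen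
  have hi : i < nums.length := by omega
  rw [List.drop_eq_getElem_cons hi] at hl
  injection hl with hx hrest
  have hps : pref nums (i + 1) = pref nums i + x := by rw [pref_succ nums i hi, ← hx]
  simp only [aLoop]
  by_cases hb : x = 0
  · have hb' : (x == 0) = true := by simpa using hb
    rw [if_pos hb']
    by_cases hz2 : z + 1 ≥ (2 : Int)
    · rw [if_pos hz2]
      obtain ⟨hi1, hpe⟩ := hz1 (by omega)
      refine iff_of_true rfl ⟨i - 1, i + 1, by omega, by omega, keyf_congr nums k _ _ ?_⟩
      rw [hps, hb, add_zero, hpe]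
    · rw [if_neg hz2, ← hps, keyf_eq nums k (i + 1)]
      have hz1'' : 1 ≤ z + 1 → 1 ≤ i + 1 ∧ pref nums (i + 1) = pref nums (i + 1 - 1) := by
        intro _
        refine ⟨by omega, ?_⟩
        simp only [Nat.add_sub_cancel]
        rw [hps, hb, add_zero]
      rcases hget : d.get? (keyf nums k (i + 1)) with _ | v
      · exact IH (i + 1) _ (z + 1) hrest (by omega) hz1''
          (dinv_none nums k i d hD hget) (nogood_none nums k i d hD hN hget)
      · obtain ⟨m, hmi, hv, hf⟩ := (hD _ _).mp hget
        by_cases hgap : (i : Int) - v > 1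
        · refine iff_of_true ?_ ⟨m, i + 1, by omega, by omega, hf.1⟩
          show (if (i : Int) - v > 1 then true
                else aLoop nums k rest (i + 1) d (pref nums (i + 1)) (z + 1)) = true
          rw [if_pos hgap]
        · have hstep := IH (i + 1) d (z + 1) hrest (by omega) hz1''
            (dinv_some nums k i d v hD hget hgap) (nogood_some nums k i d v hD hN hget hgap)
          rw [← hstep]
          show (if (i : Int) - v > 1 then true
                else aLoop nums k rest (i + 1) d (pref nums (i + 1)) (z + 1)) = true
              ↔ aLoop nums k rest (i + 1) d (pref nums (i + 1)) (z + 1) = true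
          rw [if_neg hgap]
  · have hb' : ¬((x == 0) = true) := by simpa using hb
    rw [if_neg hb']
    rw [if_neg (show ¬((0 : Int) ≥ 2) by norm_num)]
    rw [← hps, keyf_eq nums k (i + 1)]
    have hz1'' : 1 ≤ (0 : Int) → 1 ≤ i + 1 ∧ pref nums (i + 1) = pref nums (i + 1 - 1) :=
      fun h => absurd h (by norm_num)
    rcases hget : d.get? (keyf nums k (i + 1)) with _ | v
    · exact IH (i + 1) _ 0 hrest (by omega) hz1''
        (dinv_none nums k i d hD hget) (nogood_none nums k i d hD hN hget)
    · obtain ⟨m, hmi, hv, hf⟩ := (hD _ _).mp hget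
      by_cases hgap : (i : Int) - v > 1
      · refine iff_of_true ?_ ⟨m, i + 1, by omega, by omega, hf.1⟩
        show (if (i : Int) - v > 1 then true
              else aLoop nums k rest (i + 1) d (pref nums (i + 1)) 0) = true
        rw [if_pos hgap]
      · have hstep := IH (i + 1) d 0 hrest (by omega) hz1''
          (dinv_some nums k i d v hD hget hgap) (nogood_some nums k i d v hD hN hget hgap)
        rw [← hstep]
        show (if (i : Int) - v > 1 then true
              else aLoop nums k rest (i + 1) d (pref nums (i + 1)) 0) = true
            ↔ aLoop nums k rest (i + 1) d (pref nums (i + 1)) 0 = true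
        rw [if_neg hgap]

lemma aLoop_iff (nums : List Int) (k : Int) :
    ∀ (l : List Int) (i : Nat) (d : PySem.Dict Int Int) (z : Int),
      l = nums.drop i → 0 ≤ z →
      (1 ≤ z → 1 ≤ i ∧ pref nums i = pref nums (i - 1)) →
      DInv nums k i d → NoGood nums k i →
      (aLoop nums k l i d (pref nums i) z = true ↔ Good nums k) := by
  intro l
  induction l with
  | nil =>
    intro i d z hl hz0 hz1 hD hN
    have hlen := congrArg List.length hl
    simp only [List.length_nil, List.length_drop] at hlen
    refine iff_of_false (by simp [aLoop]) ?_
    rintro ⟨a, b, h1, h2, h3⟩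
    exact hN a b h1 (by omega) h3
  | cons x rest ih =>
    intro i d z hl hz0 hz1 hD hN
    exact aLoop_cons_iff nums k x rest i d z hl hz0 hz1 hD hN ih

lemma keyf_zero (nums : List Int) (k : Int) : keyf nums k 0 = 0 := by
  by_cases hk : k ≠ 0
  · simp only [keyf, if_pos hk]
    show PySem.Int.mod (pref nums 0) k = 0
    have h0 : pref nums 0 = 0 := rfl
    rw [h0]
    exact (PySem.Int.mod_eq_zero_iff_dvd 0 k).mpr (dvd_zero k)
  · simp only [keyf, if_neg hk]
    rfl

lemma dinv_init (nums : List Int) (k : Int) :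
    DInv nums k 0 (PySem.Dict.empty.insert 0 (-1)) := by
  intro r v
  rw [PySem.Dict.get?_insert]
  constructor
  · intro h
    split_ifs at h with hr
    · injection h with hv
      refine ⟨0, le_refl 0, by omega, ?_⟩
      refine And.intro ?_ (fun m' hm' => by omega)
      rw [keyf_zero]
      exact hr.symm
    · rw [PySem.Dict.get?_empty] at h
      simp at h
  · rintro ⟨m, hm, hv, hf⟩
    have hm0 : m = 0 := by omega
    subst hm0
    have hr : r = 0 := by rw [← hf.1, keyf_zero]
    rw [if_pos hr]
    simp only [Option.some.injEq]
    omega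

lemma A_iff (nums : List Int) (k : Int) : checkSubarraySum nums k = true ↔ Good nums k := by
  unfold checkSubarraySum
  by_cases h2 : nums.length < 2
  · rw [if_pos h2]
    refine iff_of_false (by simp) ?_
    rintro ⟨a, b, h1, hb, -⟩
    omega
  · rw [if_neg h2]
    exact aLoop_iff nums k nums 0 (PySem.Dict.empty.insert 0 (-1)) 0
      List.drop_zero.symm (le_refl 0)
      (fun h => absurd h (by norm_num))
      (dinv_init nums k)
      (fun a b h1 h2' _ => by omega)

-- ===== VERDICT (by name: the statement is the Claim_ definition above) =====
theorem checkSubarraySum_spec : Claim_equal_checkSubarraySum := by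
  intro nums k _
  unfold Spec_checkSubarraySum
  exact Bool.eq_iff_iff.mpr (by rw [A_iff, B_iff])
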